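-- pv_equiv track=rewrite | github.com/FrancescoCappio/OODDetectionBench | models/data_helper.py | _extract_known_class_names
-- ===== SOURCE A (Python) =====
-- def _extract_known_class_names(file_names, labels):
--     # extract name of known classes from paths of support samples
--     # we expect path with structure:
--     # /bla/bla/.../bla/class_name/image.jpg
--
--     class_names = {}
--     for lbl, fp in zip(labels, file_names):
--         if not lbl in class_names:
--             name = fp.split("/")[-2]
--             # remove underscores
--             name = name.replace("_", " ")
--             class_names[lbl] = name
--
--     sorted_names = [class_names[lbl] for lbl in sorted(class_names.keys())]
--     return sorted_names
-- ===== SOURCE B (Python) =====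
-- def _extract_known_class_names(file_names, labels):
--     # Distinct labels first, then a per-label rescan for the first matching path.
--     pairs = list(zip(labels, file_names))
--     out = []
--     for lbl in sorted(set(l for l, _ in pairs)):
--         fp = next(fp for l, fp in pairs if l == lbl)
--         out.append(fp.split("/")[-2].replace("_", " "))
--     return out
-- ===== Notes on version B (the rewrite author's own statement) =====
-- stated objective: alternative
-- what changed: Replaces A's single dict-accumulating pass (plus sorted-keys lookup) with computing the sorted distinct labels first and then rescanning the zipped pairs for each label's first matching path.
import Mathlib
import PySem

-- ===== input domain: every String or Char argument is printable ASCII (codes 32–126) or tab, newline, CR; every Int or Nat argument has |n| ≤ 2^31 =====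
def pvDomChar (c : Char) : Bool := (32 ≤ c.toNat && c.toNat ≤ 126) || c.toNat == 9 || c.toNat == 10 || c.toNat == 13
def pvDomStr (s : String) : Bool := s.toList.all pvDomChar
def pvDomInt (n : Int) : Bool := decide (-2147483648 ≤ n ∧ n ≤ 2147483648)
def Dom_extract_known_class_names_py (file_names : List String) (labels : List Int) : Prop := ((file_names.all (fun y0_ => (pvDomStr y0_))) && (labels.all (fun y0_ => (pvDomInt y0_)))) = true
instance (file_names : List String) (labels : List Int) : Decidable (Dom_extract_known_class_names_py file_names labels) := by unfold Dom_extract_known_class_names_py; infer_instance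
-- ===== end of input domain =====

-- B replaces A's dict-accumulating pass with sorted distinct labels + per-label rescan (objective: alternative decomposition, same results).

-- ===== PORT A =====
-- fp.split("/")[-2].replace("_", " ")  (the [-2] IndexError case — no '/' in fp — is excluded by Pre_; getD "" is never reached there)
def pvClassName (fp : String) : String :=
  PySem.Str.replace (((PySem.List.pyGet? ((PySem.Str.split? fp "/").getD []) (-2))).getD "") "_" " "

def extract_known_class_names_py (file_names : List String) (labels : List Int) : List String :=
  let class_names : PySem.Dict Int String :=
    (labels.zip file_names).foldl
      (fun d p => if d.contains p.1 then d else d.insert p.1 (pvClassName p.2))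
      PySem.Dict.empty
  (PySem.List.sorted class_names.keys (fun x => x) false).map (fun lbl => class_names.getD lbl "")

-- ===== PORT B =====
def extract_known_class_names_py_alt (file_names : List String) (labels : List Int) : List String :=
  let pairs := labels.zip file_names
  (PySem.List.sorted (PySem.Set.ofList (pairs.map Prod.fst)) (fun x => x) false).map
    (fun lbl =>
      match pairs.find? (fun p => p.1 == lbl) with
      | some p => pvClassName p.2
      | none => "")   -- unreachable: lbl comes from pairs.map Prod.fst

-- ===== PRECONDITION & SPEC =====
-- Pre_ excludes exactly the inputs where A raises IndexError: a zipped pair whose label has no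
-- earlier occurrence and whose path contains no '/' (fp.split("/")[-2] on a 1-element list).
def Pre_extract_known_class_names_py (file_names : List String) (labels : List Int) : Prop :=
  ∀ i, (h : i < (labels.zip file_names).length) →
    (labels.zip file_names)[i].1 ∉ (((labels.zip file_names).take i).map Prod.fst) →
    PySem.Str.isIn "/" (labels.zip file_names)[i].2 = true
instance (file_names : List String) (labels : List Int) : Decidable (Pre_extract_known_class_names_py file_names labels) := by unfold Pre_extract_known_class_names_py; infer_instance

def pvWitness_extract_known_class_names_py : List String × List Int := (["data/cat_dog/img.jpg", "data/bird/img.jpg"], [1, 0])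

def Spec_extract_known_class_names_py (file_names : List String) (labels : List Int) (out : List String) : Prop := out = extract_known_class_names_py_alt file_names labels
instance (file_names : List String) (labels : List Int) (out : List String) : Decidable (Spec_extract_known_class_names_py file_names labels out) := by unfold Spec_extract_known_class_names_py; infer_instance

-- ===== CLAIM (what is proved, stated in full; the proofs are below) =====
def Claim_equal_extract_known_class_names_py : Prop := ∀ (file_names : List String) (labels : List Int), Dom_extract_known_class_names_py file_names labels → Pre_extract_known_class_names_py file_names labels → Spec_extract_known_class_names_py file_names labels (extract_known_class_names_py file_names labels)

-- ===== LEMMAS AND PROOFS =====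

-- the dict-building fold of port A, named for the lemmas
def pvFold (ps : List (Int × String)) (d : PySem.Dict Int String) : PySem.Dict Int String :=
  ps.foldl (fun d p => if d.contains p.1 then d else d.insert p.1 (pvClassName p.2)) d

lemma pvFold_get? (ps : List (Int × String)) (d : PySem.Dict Int String) (l : Int) :
    (pvFold ps d).get? l =
      match d.get? l with
      | some v => some v
      | none => (ps.find? (fun p => p.1 == l)).map (fun p => pvClassName p.2) := by
  induction ps generalizing d with
  | nil => cases h : d.get? l <;> simp [pvFold, h]
  | cons p t ih =>
    simp only [pvFold, List.foldl_cons] at ih ⊢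
    by_cases hc : d.contains p.1
    · rw [if_pos hc, ih]
      by_cases he : p.1 = l
      · subst he
        have : (d.get? p.1).isSome := by rw [← PySem.Dict.contains_eq_isSome_get?]; exact hc
        obtain ⟨v, hv⟩ := Option.isSome_iff_exists.mp this
        simp [hv]
      · rw [List.find?_cons_of_neg (by simpa using he)]
    · rw [if_neg hc, ih]
      by_cases he : p.1 = l
      · subst he
        have hd : d.get? p.1 = none := by
          rw [PySem.Dict.get?_eq_none_iff_contains]; simpa using hc
        simp [PySem.Dict.get?_insert_self, hd]
      · rw [PySem.Dict.get?_insert_of_ne _ _ (Ne.symm he), List.find?_cons_of_neg (by simpa using he)]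

lemma pvFold_keys (ps : List (Int × String)) (d : PySem.Dict Int String) :
    (pvFold ps d).keys = PySem.Set.update d.keys (ps.map Prod.fst) := by
  induction ps generalizing d with
  | nil => simp [pvFold, PySem.Set.update_nil]
  | cons p t ih =>
    simp only [pvFold, List.foldl_cons, List.map_cons, PySem.Set.update_cons] at ih ⊢
    by_cases hc : d.contains p.1
    · rw [if_pos hc, ih]
      have : PySem.Set.add d.keys p.1 = d.keys :=
        PySem.Set.add_of_mem ((PySem.Dict.contains_iff_mem_keys _ _).mp hc)
      rw [this]
    · rw [if_neg hc, ih]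
      have hk : (d.insert p.1 (pvClassName p.2)).keys = d.keys ++ [p.1] :=
        PySem.Dict.keys_insert_of_not_contains _ _ (by simpa using hc)
      have ha : PySem.Set.add d.keys p.1 = d.keys ++ [p.1] :=
        PySem.Set.add_of_not_mem (fun hm => hc ((PySem.Dict.contains_iff_mem_keys _ _).mpr hm))
      rw [hk, ha]

-- ===== VERDICT (by name: the statement is the Claim_ definition above) =====
theorem extract_known_class_names_py_spec : Claim_equal_extract_known_class_names_py := by
  intro file_names labels _ _
  unfold Spec_extract_known_class_names_py extract_known_class_names_py extract_known_class_names_py_alt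
  show (PySem.List.sorted (pvFold (labels.zip file_names) PySem.Dict.empty).keys (fun x => x) false).map _ = _
  set ps := labels.zip file_names with hps
  have hkeys : (pvFold ps PySem.Dict.empty).keys = PySem.Set.ofList (ps.map Prod.fst) := by
    rw [pvFold_keys]
    simp [PySem.Dict.keys_empty, PySem.Set.update_nil_left]
  rw [hkeys]
  apply List.map_congr_left
  intro l hl
  have hmem : l ∈ ps.map Prod.fst :=
    (PySem.Set.mem_ofList _ _).mp ((PySem.List.mem_sorted _ _ _ _).mp hl)
  obtain ⟨p, hp⟩ : ∃ p, ps.find? (fun p => p.1 == l) = some p := by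
    apply Option.isSome_iff_exists.mp
    apply List.find?_isSome.mpr
    obtain ⟨q, hq, hfst⟩ := List.mem_map.mp hmem
    exact ⟨q, hq, by simpa using hfst⟩
  show ((pvFold ps PySem.Dict.empty).get? l).getD "" = _
  rw [pvFold_get? ps PySem.Dict.empty l, hp]
  simp [PySem.Dict.get?_empty]
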